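-- pv_equiv track=rewrite | github.com/chanzuckerberg/Ontomatcher | Python/text/nlp.py | join_txt_seq
-- ===== SOURCE A (Python) =====
-- def join_txt_seq(txt_seq):
--     char_starts = [0]
--     joined_txt = txt_seq[0]
--     for txt in txt_seq[1:]:
--         if not txt:
--             continue
--         joined_txt += '\n\n'
--         char_starts.append(len(joined_txt))
--         joined_txt += txt
--     return joined_txt, char_starts
-- ===== SOURCE B (Python) =====
-- def join_txt_seq(txt_seq):
--     pieces = [txt_seq[0]] + [t for t in txt_seq[1:] if t]
--     joined_txt = '\n\n'.join(pieces)
--     char_starts = [0]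
--     pos = len(pieces[0])
--     for p in pieces[1:]:
--         pos += 2
--         char_starts.append(pos)
--         pos += len(p)
--     return joined_txt, char_starts
-- ===== Notes on version B (the rewrite author's own statement) =====
-- stated objective: simpler
-- what changed: A builds the result in one loop that concatenates separators and text while measuring the growing string; B first builds the filtered piece list, produces the text with a single ' '.join, and computes char_starts in a separate cumulative-offset pass.
import Mathlib
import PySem

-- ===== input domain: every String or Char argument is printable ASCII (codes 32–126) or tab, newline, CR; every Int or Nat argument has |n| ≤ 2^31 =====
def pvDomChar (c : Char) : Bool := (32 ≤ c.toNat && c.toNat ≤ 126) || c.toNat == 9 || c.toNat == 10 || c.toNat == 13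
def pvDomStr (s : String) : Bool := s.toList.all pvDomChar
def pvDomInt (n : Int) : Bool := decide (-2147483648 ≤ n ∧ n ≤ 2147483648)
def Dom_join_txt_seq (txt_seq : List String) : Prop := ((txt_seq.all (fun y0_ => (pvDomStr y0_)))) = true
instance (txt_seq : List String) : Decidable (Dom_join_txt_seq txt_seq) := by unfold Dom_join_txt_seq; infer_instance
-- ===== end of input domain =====

-- B replaces A's single accumulate-as-you-go loop by a filter + one '\n\n'.join plus a
-- separate cumulative offset pass (objective: simpler decomposition; same return value).


-- ===== PORT A =====
-- literal port of A: joined_txt starts as txt_seq[0]; single loop over txt_seq[1:]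
-- appending '\n\n' + txt and recording len(joined_txt) after the separator.
def join_txt_seq (txt_seq : List String) : String × List Int :=
  let joined0 := ((PySem.List.pyGet? txt_seq 0).getD "").toList   -- txt_seq[0]; total only under Pre_ (txt_seq ≠ [])
  let st := (PySem.List.slice txt_seq (some 1) none).foldl
    (fun (st : List Char × List Int) txt =>
      if txt.toList = [] then st
      else
        let j := st.1 ++ ['\n', '\n']
        (j ++ txt.toList, st.2 ++ [(j.length : Int)]))
    (joined0, [(0 : Int)])
  (String.ofList st.1, st.2)

-- ===== PORT B =====
-- literal port of B: pieces = [txt_seq[0]] + non-empty tail, '\n\n'.join, then a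
-- separate cumulative pass for the offsets.
def join_txt_seq_alt (txt_seq : List String) : String × List Int :=
  let pieces := ((PySem.List.pyGet? txt_seq 0).getD "") ::
    (PySem.List.slice txt_seq (some 1) none).filter (fun t => t.toList ≠ [])
  let joined_txt := PySem.Str.join "\n\n" pieces
  let st := (pieces.drop 1).foldl
    (fun (st : List Int × Int) p =>
      let pos := st.2 + 2
      (st.1 ++ [pos], pos + PySem.Str.len p))
    ([(0 : Int)], PySem.Str.len (pieces.headD ""))
  (joined_txt, st.1)

-- ===== PRECONDITION & SPEC =====
-- Pre_ excludes only the empty list, on which A raises IndexError at txt_seq[0].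
def Pre_join_txt_seq (txt_seq : List String) : Prop := txt_seq ≠ []
instance (txt_seq : List String) : Decidable (Pre_join_txt_seq txt_seq) := by unfold Pre_join_txt_seq; infer_instance
def pvWitness_join_txt_seq : List String := ["ab", "", "c"]

def Spec_join_txt_seq (txt_seq : List String) (out : String × List Int) : Prop := out = join_txt_seq_alt txt_seq
instance (txt_seq : List String) (out : String × List Int) : Decidable (Spec_join_txt_seq txt_seq out) := by unfold Spec_join_txt_seq; infer_instance

-- ===== CLAIM (what is proved, stated in full; the proofs are below) =====
def Claim_equal_join_txt_seq : Prop := ∀ (txt_seq : List String), Dom_join_txt_seq txt_seq → Pre_join_txt_seq txt_seq → Spec_join_txt_seq txt_seq (join_txt_seq txt_seq)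

-- ===== LEMMAS AND PROOFS =====

-- canonical text glued after the first piece (tail view, skipping empties)
def pvGlue : List String → List Char
  | [] => []
  | t :: ts => if t.toList = [] then pvGlue ts else ('\n' :: '\n' :: t.toList) ++ pvGlue ts

-- canonical offsets for the tail, skipping empties
def pvStarts (pos : Int) : List String → List Int
  | [] => []
  | t :: ts => if t.toList = [] then pvStarts pos ts
               else (pos + 2) :: pvStarts (pos + 2 + t.toList.length) ts

-- offsets for an already-filtered tail (B's point of view)
def pvStartsNE (pos : Int) : List String → List Int
  | [] => []
  | t :: ts => (pos + 2) :: pvStartsNE (pos + 2 + t.toList.length) ts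

theorem pvA_foldl (l : List String) : ∀ (j : List Char) (cs : List Int),
    l.foldl (fun (st : List Char × List Int) txt =>
        if txt.toList = [] then st
        else
          let j' := st.1 ++ ['\n', '\n']
          (j' ++ txt.toList, st.2 ++ [(j'.length : Int)])) (j, cs)
      = (j ++ pvGlue l, cs ++ pvStarts (j.length : Int) l) := by
  induction l with
  | nil => intro j cs; simp [pvGlue, pvStarts]
  | cons t ts ih =>
    intro j cs
    rw [List.foldl_cons]
    by_cases h' : t.toList = []
    · rw [if_pos h', ih]
      simp only [pvGlue, pvStarts]
      rw [if_pos h', if_pos h']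
    · have e1 : (((j ++ ['\n', '\n']).length : Nat) : Int) = (j.length : Int) + 2 := by
        push_cast [List.length_append, List.length_cons, List.length_nil]; ring
      have e2 : (((j ++ ['\n', '\n'] ++ t.toList).length : Nat) : Int)
          = (j.length : Int) + 2 + (t.toList.length : Int) := by
        push_cast [List.length_append, List.length_cons, List.length_nil]; ring
      rw [if_neg h', ih]
      simp only [pvGlue, pvStarts]
      rw [if_neg h', if_neg h', Prod.mk.injEq]
      refine ⟨by simp, ?_⟩
      rw [e1, e2]
      simp

theorem pvStarts_filter (l : List String) : ∀ pos : Int,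
    pvStarts pos l = pvStartsNE pos (l.filter (fun t => t.toList ≠ [])) := by
  induction l with
  | nil => intro pos; simp [pvStarts, pvStartsNE]
  | cons t ts ih =>
    intro pos
    rw [List.filter_cons]
    by_cases h' : t.toList = []
    · rw [if_neg (by simp [h'])]
      simp only [pvStarts]
      rw [if_pos h']
      exact ih pos
    · rw [if_pos (by simp [h'])]
      simp only [pvStarts, pvStartsNE]
      rw [if_neg h', ih]

theorem pvB_foldl (ps : List String) : ∀ (cs : List Int) (pos : Int),
    (ps.foldl (fun (st : List Int × Int) p =>
        let pos := st.2 + 2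
        (st.1 ++ [pos], pos + PySem.Str.len p)) (cs, pos)).1
      = cs ++ pvStartsNE pos ps := by
  induction ps with
  | nil => intro cs pos; simp [pvStartsNE]
  | cons p ps ih =>
    intro cs pos
    simp only [List.foldl_cons, pvStartsNE]
    rw [ih]
    simp [PySem.Str.len_eq]

theorem pvJoin_glue (sep : List Char) (hsep : sep = ['\n', '\n']) (l : List String) :
    ∀ a : List Char,
      PySem.Chars.join sep (a :: (l.filter (fun t => t.toList ≠ [])).map String.toList)
        = a ++ pvGlue l := by
  induction l with
  | nil => intro a; simp [pvGlue, PySem.Chars.join_singleton]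
  | cons t ts ih =>
    intro a
    rw [List.filter_cons]
    by_cases h' : t.toList = []
    · rw [if_neg (by simp [h'])]
      simp only [pvGlue]
      rw [if_pos h']
      exact ih a
    · rw [if_pos (by simp [h']), List.map_cons, PySem.Chars.join_cons_cons, ih t.toList]
      simp only [pvGlue]
      rw [if_neg h']
      subst hsep; simp

theorem join_txt_seq_eq_alt (txt_seq : List String) :
    join_txt_seq txt_seq = join_txt_seq_alt txt_seq := by
  unfold join_txt_seq join_txt_seq_alt
  simp only [pvA_foldl, pvB_foldl]
  rw [Prod.mk.injEq]
  constructor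
  · apply String.toList_inj.mp
    rw [String.toList_ofList, PySem.Str.toList_join, List.map_cons]
    exact (pvJoin_glue "\n\n".toList (by decide) _ _).symm
  · simp only [List.headD_cons, List.drop_succ_cons, List.drop_zero]
    rw [pvStarts_filter, PySem.Str.len_eq]

-- ===== VERDICT (by name: the statement is the Claim_ definition above) =====
theorem join_txt_seq_spec : Claim_equal_join_txt_seq := by
  intro txt_seq _ _
  exact join_txt_seq_eq_alt txt_seq
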